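-- pv_equiv track=rewrite | github.com/Feng-Lab-MIT/shank3_macaque_phenotyping | home_cage_scripts/utils.py | filter_consecutive_integers
-- ===== SOURCE A (Python) =====
-- def filter_consecutive_integers(nums, min_consecutive=10):
--     """Keep only runs of consecutive integers with length >= min_consecutive."""
--     result = []
--     start = 0
--     while start < len(nums):
--         end = start
--         while end + 1 < len(nums) and nums[end + 1] == nums[end] + 1:
--             end += 1
--         if end - start + 1 >= min_consecutive:
--             result.extend(nums[start:end + 1])
--         start = end + 1
--     return result
-- ===== SOURCE B (Python) =====
-- def filter_consecutive_integers(nums, min_consecutive=10):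
--     """Keep only runs of consecutive integers with length >= min_consecutive."""
--     result = []
--     run = []
--     for x in nums:
--         if run and x == run[-1] + 1:
--             run.append(x)
--         else:
--             if len(run) >= min_consecutive:
--                 result.extend(run)
--             run = [x]
--     if len(run) >= min_consecutive:
--         result.extend(run)
--     return result
-- ===== Notes on version B (the rewrite author's own statement) =====
-- stated objective: simpler
-- what changed: Replaced A's nested while-loops over indices (inner scan to find each run's end, then a slice copy) with a single for-loop over the elements that maintains the current run as a buffer and flushes it at each break and once at the end.
import Mathlib
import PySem

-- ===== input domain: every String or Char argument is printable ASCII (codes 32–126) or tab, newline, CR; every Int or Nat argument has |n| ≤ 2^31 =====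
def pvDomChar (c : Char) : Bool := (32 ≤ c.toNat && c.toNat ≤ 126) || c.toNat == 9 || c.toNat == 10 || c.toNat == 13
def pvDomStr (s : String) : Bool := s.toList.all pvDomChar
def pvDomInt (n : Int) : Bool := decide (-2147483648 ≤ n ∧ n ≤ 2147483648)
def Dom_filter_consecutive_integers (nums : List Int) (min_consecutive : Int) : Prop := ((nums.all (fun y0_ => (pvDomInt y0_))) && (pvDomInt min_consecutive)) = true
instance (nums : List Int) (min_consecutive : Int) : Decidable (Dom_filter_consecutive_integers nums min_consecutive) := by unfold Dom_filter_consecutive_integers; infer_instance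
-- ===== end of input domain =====

-- B replaces A's nested index-based while-loops (inner scan for each run's end, slice copy)
-- by one pass over the elements with a current-run buffer flushed at each break; objective: simpler.

-- ===== PORT A =====
-- inner while loop: advance `e` while nums[e+1] == nums[e] + 1
def pvFindEnd (nums : List Int) (e : Nat) : Nat :=
  if _h : e + 1 < nums.length ∧ nums.getD (e + 1) 0 = nums.getD e 0 + 1 then
    pvFindEnd nums (e + 1)
  else e
termination_by nums.length - e

theorem pvFindEnd_ge (nums : List Int) (e : Nat) : e ≤ pvFindEnd nums e := by
  unfold pvFindEnd
  split
  · have := pvFindEnd_ge nums (e + 1); omega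
  · exact le_refl e
termination_by nums.length - e

-- outer while loop of A
def pvOuter (nums : List Int) (min_consecutive : Int) (start : Nat) (result : List Int) : List Int :=
  if _h : start < nums.length then
    let e := pvFindEnd nums start
    let result' := if ((e : Int) - (start : Int) + 1 ≥ min_consecutive)
      then result ++ PySem.List.slice nums (some (start : Int)) (some ((e : Int) + 1))
      else result
    pvOuter nums min_consecutive (e + 1) result'
  else result
termination_by nums.length - start
decreasing_by
  have := pvFindEnd_ge nums start
  omega

def filter_consecutive_integers (nums : List Int) (min_consecutive : Int) : List Int :=
  pvOuter nums min_consecutive 0 []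

-- ===== PORT B =====
-- flush of B: append the run when it is long enough
def pvFlush (min_consecutive : Int) (result run : List Int) : List Int :=
  if (run.length : Int) ≥ min_consecutive then result ++ run else result

-- the single for-loop of B over the elements, carrying (result, run)
def pvAltLoop (min_consecutive : Int) (result run : List Int) : List Int → List Int
  | [] => pvFlush min_consecutive result run
  | x :: xs =>
    if run ≠ [] ∧ x = run.getLast! + 1 then
      pvAltLoop min_consecutive result (run ++ [x]) xs
    else
      pvAltLoop min_consecutive (pvFlush min_consecutive result run) [x] xs

def filter_consecutive_integers_alt (nums : List Int) (min_consecutive : Int) : List Int :=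
  pvAltLoop min_consecutive [] [] nums

-- ===== PRECONDITION & SPEC =====
def Spec_filter_consecutive_integers (nums : List Int) (min_consecutive : Int) (out : List Int) : Prop := out = filter_consecutive_integers_alt nums min_consecutive
instance (nums : List Int) (min_consecutive : Int) (out : List Int) : Decidable (Spec_filter_consecutive_integers nums min_consecutive out) := by unfold Spec_filter_consecutive_integers; infer_instance

-- ===== CLAIM (what is proved, stated in full; the proofs are below) =====
def Claim_equal_filter_consecutive_integers : Prop := ∀ (nums : List Int) (min_consecutive : Int), Dom_filter_consecutive_integers nums min_consecutive → Spec_filter_consecutive_integers nums min_consecutive (filter_consecutive_integers nums min_consecutive)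

-- ===== LEMMAS AND PROOFS =====

-- the current run of B, when it spans indices s..j of nums
def pvSeg (nums : List Int) (s j : Nat) : List Int := (nums.drop s).take (j + 1 - s)

theorem pvSeg_length (nums : List Int) (s j : Nat) (_hsj : s ≤ j) (hj : j < nums.length) :
    (pvSeg nums s j).length = j + 1 - s := by
  simp [pvSeg]; omega

theorem pvSeg_getLast! (nums : List Int) (s j : Nat) (hsj : s ≤ j) (hj : j < nums.length) :
    (pvSeg nums s j).getLast! = nums[j] := by
  rw [List.getLast!_eq_getElem!]
  rw [getElem!_pos _ _ (by rw [pvSeg_length nums s j hsj hj]; omega)]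
  simp [pvSeg]
  have h2 : s + (min (j + 1 - s) (nums.length - s) - 1) = j := by omega
  simp [h2]

theorem pvSeg_append (nums : List Int) (s j : Nat) (hsj : s ≤ j) (hj : j + 1 < nums.length) :
    pvSeg nums s j ++ [nums[j + 1]] = pvSeg nums s (j + 1) := by
  simp only [pvSeg]
  rw [show j + 1 + 1 - s = (j + 1 - s) + 1 by omega, List.take_add_one]
  congr 1
  rw [List.getElem?_drop, List.getElem?_eq_getElem (by omega)]
  simp
  congr 1
  omega

theorem pvFindEnd_lt (nums : List Int) (e : Nat) (he : e < nums.length) :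
    pvFindEnd nums e < nums.length := by
  unfold pvFindEnd
  split
  · next h => exact pvFindEnd_lt nums (e + 1) h.1
  · exact he
termination_by nums.length - e

theorem pvFlush_seg (nums : List Int) (minc : Int) (res : List Int) (s e : Nat)
    (hse : s ≤ e) (he : e < nums.length) :
    (if ((e : Int) - (s : Int) + 1 ≥ minc)
      then res ++ PySem.List.slice nums (some (s : Int)) (some ((e : Int) + 1))
      else res) = pvFlush minc res (pvSeg nums s e) := by
  have hc : ((e : Int) + 1) = ((e + 1 : Nat) : Int) := by push_cast; ring
  rw [hc, PySem.List.slice_natCast]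
  have hseg : (nums.drop s).take (e + 1 - s) = pvSeg nums s e := rfl
  rw [hseg]
  simp only [pvFlush, pvSeg_length nums s e hse he]
  split_ifs with h1 h2 h2 <;> first | rfl | (exfalso; omega)

-- main invariant: B's loop, carrying the run nums[s..j], finishes A's current run and continues as A
theorem pvLoop_eq (nums : List Int) (minc : Int) :
    ∀ (k s j : Nat) (res : List Int), nums.length - j ≤ k → s ≤ j → j < nums.length →
    pvAltLoop minc res (pvSeg nums s j) (nums.drop (j + 1)) =
      pvOuter nums minc (pvFindEnd nums j + 1) (pvFlush minc res (pvSeg nums s (pvFindEnd nums j))) := by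
  intro k
  induction k with
  | zero => intro s j res hk hsj hj; omega
  | succ k ih =>
    intro s j res hk hsj hj
    by_cases hj1 : j + 1 < nums.length
    · rw [List.drop_eq_getElem_cons hj1]
      have hne : pvSeg nums s j ≠ [] := by
        have hl := pvSeg_length nums s j hsj hj
        intro h; rw [h] at hl; simp at hl; omega
      by_cases hcons : nums[j + 1] = nums[j] + 1
      · have hfe : pvFindEnd nums j = pvFindEnd nums (j + 1) := by
          rw [pvFindEnd, dif_pos ⟨hj1, by
            rw [List.getD_eq_getElem _ _ hj1, List.getD_eq_getElem _ _ (by omega)]; exact hcons⟩]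
        rw [pvAltLoop,
          if_pos ⟨hne, by rw [pvSeg_getLast! nums s j hsj hj]; exact hcons⟩,
          pvSeg_append nums s j hsj hj1,
          ih s (j + 1) res (by omega) (by omega) hj1, hfe]
      · have hfe : pvFindEnd nums j = j := by
          rw [pvFindEnd, dif_neg]
          rintro ⟨-, h2⟩
          rw [List.getD_eq_getElem _ _ hj1, List.getD_eq_getElem _ _ (by omega)] at h2
          exact hcons h2
        have hsingle : [nums[j + 1]] = pvSeg nums (j + 1) (j + 1) := by
          simp only [pvSeg]
          rw [List.drop_eq_getElem_cons hj1, show j + 1 + 1 - (j + 1) = 1 from by omega]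
          rfl
        rw [pvAltLoop,
          if_neg (by
            rintro ⟨-, hlast⟩
            rw [pvSeg_getLast! nums s j hsj hj] at hlast
            exact hcons hlast),
          hsingle,
          ih (j + 1) (j + 1) _ (by omega) (le_refl _) hj1, hfe]
        conv_rhs => rw [pvOuter, dif_pos hj1]
        simp only [pvFlush_seg nums minc (pvFlush minc res (pvSeg nums s j)) (j + 1)
          (pvFindEnd nums (j + 1)) (pvFindEnd_ge nums (j + 1)) (pvFindEnd_lt nums (j + 1) hj1)]
    · have hdrop : nums.drop (j + 1) = [] := by
        rw [List.drop_eq_nil_iff]; omega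
      have hfe : pvFindEnd nums j = j := by
        rw [pvFindEnd, dif_neg]
        rintro ⟨h1, -⟩
        omega
      rw [hdrop, pvAltLoop, hfe, pvOuter, dif_neg (by omega)]

-- ===== VERDICT (by name: the statement is the Claim_ definition above) =====
theorem filter_consecutive_integers_spec : Claim_equal_filter_consecutive_integers := by
  intro nums minc _
  unfold Spec_filter_consecutive_integers filter_consecutive_integers filter_consecutive_integers_alt
  match nums with
  | [] =>
    rw [pvOuter, dif_neg (by simp), pvAltLoop, pvFlush]
    simp
  | x :: xs =>
    have h0 : 0 < (x :: xs).length := by simp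
    rw [pvAltLoop, if_neg (by rintro ⟨h, -⟩; exact h rfl)]
    have hflush : pvFlush minc [] [] = ([] : List Int) := by
      unfold pvFlush; split_ifs <;> simp
    rw [hflush]
    have hsingle : [x] = pvSeg (x :: xs) 0 0 := by simp [pvSeg]
    have hmain := pvLoop_eq (x :: xs) minc (x :: xs).length 0 0 [] (by simp) (le_refl 0) h0
    simp only [List.drop_succ_cons, List.drop_zero] at hmain
    rw [hsingle, hmain]
    conv_lhs => rw [pvOuter, dif_pos h0]
    simp only [pvFlush_seg (x :: xs) minc [] 0 (pvFindEnd (x :: xs) 0)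
      (Nat.zero_le _) (pvFindEnd_lt (x :: xs) 0 h0)]
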